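-- pv_equiv track=rewrite | github.com/pranav-rivvi/ping-crm | src/apollo_client.py | get_target_titles
-- ===== SOURCE A (Python) =====
-- from typing import Optional, List, Dict
--
-- def get_target_titles(industry: str) -> List[str]:
--     """
--     Determine which titles to search based on company industry
--
--     Args:
--         industry: Company industry string
--
--     Returns:
--         List of job titles to search for
--     """
--     industry_lower = industry.lower()
--
--     # Base titles for everyone
--     base_titles = ['CEO', 'COO', 'CFO', 'President', 'Founder']
--
--     # Industry-specific titles
--     if any(kw in industry_lower for kw in ['insurance', 'payer', 'health plan']):
--         return base_titles + [
--             'CMO', 'Chief Medical Officer',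
--             'VP Quality', 'VP Operations',
--             'VP Medicare', 'VP Medicare Advantage',
--             'Director Star Ratings', 'Director Quality',
--             'VP Member Services'
--         ]
--
--     elif any(kw in industry_lower for kw in ['hospital', 'provider', 'health system', 'clinic', 'medical']):
--         return base_titles + [
--             'VP Operations', 'VP Care Management',
--             'VP Population Health', 'Chief Clinical Officer',
--             'Director Care Management', 'VP Quality',
--             'Chief Nursing Officer'
--         ]
--
--     elif any(kw in industry_lower for kw in ['pharmacy', 'pbm', 'drug']):
--         return base_titles + [
--             'VP Pharmacy Operations', 'VP Clinical Programs',
--             'Director Adherence', 'Chief Pharmacy Officer',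
--             'VP Pharmacy Services'
--         ]
--
--     elif any(kw in industry_lower for kw in ['pharma', 'biotech', 'pharmaceutical']):
--         return base_titles + [
--             'VP Commercial', 'VP Market Access',
--             'Director Patient Services', 'VP Marketing'
--         ]
--
--     else:
--         # Default for other industries
--         return base_titles + [
--             'CTO', 'VP Strategy', 'VP Innovation',
--             'VP Business Development', 'VP Sales'
--         ]
-- ===== SOURCE B (Python) =====
-- BASE_TITLES = ['CEO', 'COO', 'CFO', 'President', 'Founder']
--
-- # Every keyword tagged with the priority index of its title set (lower index = higher priority).
-- KEYWORD_CATEGORY = [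
--     ('insurance', 0), ('payer', 0), ('health plan', 0),
--     ('hospital', 1), ('provider', 1), ('health system', 1), ('clinic', 1), ('medical', 1),
--     ('pharmacy', 2), ('pbm', 2), ('drug', 2),
--     ('pharma', 3), ('biotech', 3), ('pharmaceutical', 3),
-- ]
--
-- EXTRA_TITLES = [
--     ['CMO', 'Chief Medical Officer', 'VP Quality', 'VP Operations',
--      'VP Medicare', 'VP Medicare Advantage', 'Director Star Ratings',
--      'Director Quality', 'VP Member Services'],
--     ['VP Operations', 'VP Care Management', 'VP Population Health',
--      'Chief Clinical Officer', 'Director Care Management', 'VP Quality',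
--      'Chief Nursing Officer'],
--     ['VP Pharmacy Operations', 'VP Clinical Programs', 'Director Adherence',
--      'Chief Pharmacy Officer', 'VP Pharmacy Services'],
--     ['VP Commercial', 'VP Market Access', 'Director Patient Services',
--      'VP Marketing'],
--     ['CTO', 'VP Strategy', 'VP Innovation', 'VP Business Development', 'VP Sales'],
-- ]
--
--
-- def get_target_titles(industry: str):
--     low = industry.lower()
--     # collect the category of EVERY keyword occurring in the string, then keep
--     # the highest-priority (minimum) one; no match falls through to the default set
--     matched = [cat for kw, cat in KEYWORD_CATEGORY if kw in low]
--     cat = min(matched, default=len(EXTRA_TITLES) - 1)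
--     return BASE_TITLES + EXTRA_TITLES[cat]
-- ===== Notes on version B (the rewrite author's own statement) =====
-- stated objective: alternative
-- what changed: Instead of an early-exit if/elif chain over keyword groups, B flattens all keywords into one keyword-to-priority list, collects the category of every keyword present in the lowered string in a single comprehension, aggregates with min (default = last category) and indexes an extras table with the result.
import Mathlib
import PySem

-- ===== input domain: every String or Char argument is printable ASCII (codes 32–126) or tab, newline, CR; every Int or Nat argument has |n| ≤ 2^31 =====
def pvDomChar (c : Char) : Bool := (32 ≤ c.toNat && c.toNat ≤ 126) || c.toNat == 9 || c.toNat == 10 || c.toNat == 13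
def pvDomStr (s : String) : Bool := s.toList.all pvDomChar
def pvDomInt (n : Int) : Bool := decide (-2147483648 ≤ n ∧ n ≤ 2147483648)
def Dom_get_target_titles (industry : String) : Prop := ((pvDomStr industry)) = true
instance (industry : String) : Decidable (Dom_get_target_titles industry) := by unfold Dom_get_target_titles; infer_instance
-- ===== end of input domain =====

-- B replaces A's early-exit if/elif keyword-group chain by a single flat scan that collects
-- every matching keyword's priority index and aggregates with min (alternative; same cost).

-- ===== PORT A =====
def get_target_titles (industry : String) : List String :=
  let industry_lower := PySem.Str.lower industry
  let base_titles := ["CEO", "COO", "CFO", "President", "Founder"]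
  if ["insurance", "payer", "health plan"].any (fun kw => PySem.Str.isIn kw industry_lower) then
    base_titles ++ ["CMO", "Chief Medical Officer", "VP Quality", "VP Operations",
      "VP Medicare", "VP Medicare Advantage", "Director Star Ratings",
      "Director Quality", "VP Member Services"]
  else if ["hospital", "provider", "health system", "clinic", "medical"].any (fun kw => PySem.Str.isIn kw industry_lower) then
    base_titles ++ ["VP Operations", "VP Care Management", "VP Population Health",
      "Chief Clinical Officer", "Director Care Management", "VP Quality",
      "Chief Nursing Officer"]
  else if ["pharmacy", "pbm", "drug"].any (fun kw => PySem.Str.isIn kw industry_lower) then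
    base_titles ++ ["VP Pharmacy Operations", "VP Clinical Programs", "Director Adherence",
      "Chief Pharmacy Officer", "VP Pharmacy Services"]
  else if ["pharma", "biotech", "pharmaceutical"].any (fun kw => PySem.Str.isIn kw industry_lower) then
    base_titles ++ ["VP Commercial", "VP Market Access", "Director Patient Services",
      "VP Marketing"]
  else
    base_titles ++ ["CTO", "VP Strategy", "VP Innovation",
      "VP Business Development", "VP Sales"]

-- ===== PORT B =====
def pvBaseTitles : List String := ["CEO", "COO", "CFO", "President", "Founder"]

-- every keyword tagged with the priority index of its title set
def pvKeywordCategory : List (String × Nat) :=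
  [("insurance", 0), ("payer", 0), ("health plan", 0),
   ("hospital", 1), ("provider", 1), ("health system", 1), ("clinic", 1), ("medical", 1),
   ("pharmacy", 2), ("pbm", 2), ("drug", 2),
   ("pharma", 3), ("biotech", 3), ("pharmaceutical", 3)]

def pvExtraTitles : List (List String) :=
  [["CMO", "Chief Medical Officer", "VP Quality", "VP Operations",
    "VP Medicare", "VP Medicare Advantage", "Director Star Ratings",
    "Director Quality", "VP Member Services"],
   ["VP Operations", "VP Care Management", "VP Population Health",
    "Chief Clinical Officer", "Director Care Management", "VP Quality",
    "Chief Nursing Officer"],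
   ["VP Pharmacy Operations", "VP Clinical Programs", "Director Adherence",
    "Chief Pharmacy Officer", "VP Pharmacy Services"],
   ["VP Commercial", "VP Market Access", "Director Patient Services",
    "VP Marketing"],
   ["CTO", "VP Strategy", "VP Innovation", "VP Business Development", "VP Sales"]]

def get_target_titles_alt (industry : String) : List String :=
  let low := PySem.Str.lower industry
  -- [cat for kw, cat in KEYWORD_CATEGORY if kw in low]
  let matched := pvKeywordCategory.filterMap
    (fun q => if PySem.Str.isIn q.1 low then some q.2 else none)
  -- min(matched, default=len(EXTRA_TITLES) - 1)
  let cat := PySem.List.minD matched (fun x => x) (pvExtraTitles.length - 1)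
  -- EXTRA_TITLES[cat]: cat is provably < 5, so getD's default is never used
  pvBaseTitles ++ pvExtraTitles.getD cat []

-- ===== PRECONDITION & SPEC =====
def Spec_get_target_titles (industry : String) (out : List String) : Prop := out = get_target_titles_alt industry
instance (industry : String) (out : List String) : Decidable (Spec_get_target_titles industry out) := by unfold Spec_get_target_titles; infer_instance

-- ===== CLAIM (what is proved, stated in full; the proofs are below) =====
def Claim_equal_get_target_titles : Prop := ∀ (industry : String), Dom_get_target_titles industry → Spec_get_target_titles industry (get_target_titles industry)

-- ===== LEMMAS AND PROOFS =====

-- the comprehension over keyword/category pairs with a constant category is a filter on the keywords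
theorem pv_fm_seg (low : String) (kws : List String) (i : Nat) :
    (kws.map (fun kw => (kw, i))).filterMap
        (fun q : String × Nat => if PySem.Str.isIn q.1 low then some q.2 else none)
      = (kws.filter (fun kw => PySem.Str.isIn kw low)).map (fun _ => i) := by
  induction kws with
  | nil => rfl
  | cons h t ih =>
    simp only [List.map_cons, List.filterMap_cons, List.filter_cons]
    by_cases hp : PySem.Str.isIn h low
    · simp only [hp, if_true, List.map_cons]; rw [ih]
    · simp only [hp, Bool.false_eq_true, if_false]; rw [ih]

-- min with a default picks k when k is a member and a lower bound
theorem pv_minD_eq {l : List Nat} {k d : Nat} (hk : k ∈ l) (hmin : ∀ x ∈ l, k ≤ x) :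
    PySem.List.minD l (fun x => x) d = k := by
  cases hm : PySem.List.min? l (fun x : Nat => x) with
  | none => exact absurd ((PySem.List.min?_eq_none_iff l _).mp hm ▸ hk) (List.not_mem_nil)
  | some m =>
    have h1 : k ≤ m := hmin m (PySem.List.min?_mem hm)
    have h2 : m ≤ k := PySem.List.min?_isMin hm k hk
    simp [PySem.List.minD, hm, le_antisymm h1 h2]

theorem get_target_titles_eq (industry : String) :
    get_target_titles industry = get_target_titles_alt industry := by
  simp only [get_target_titles, get_target_titles_alt]
  set low := PySem.Str.lower industry with hlow
  have hsplit : pvKeywordCategory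
      = (["insurance", "payer", "health plan"].map (fun kw => (kw, 0)))
        ++ (["hospital", "provider", "health system", "clinic", "medical"].map (fun kw => (kw, 1)))
        ++ (["pharmacy", "pbm", "drug"].map (fun kw => (kw, 2)))
        ++ (["pharma", "biotech", "pharmaceutical"].map (fun kw => (kw, 3))) := rfl
  rw [hsplit, List.filterMap_append, List.filterMap_append, List.filterMap_append,
      pv_fm_seg, pv_fm_seg, pv_fm_seg, pv_fm_seg]
  set s0 := (["insurance", "payer", "health plan"].filter (fun kw => PySem.Str.isIn kw low)).map (fun _ => 0) with hs0
  set s1 := (["hospital", "provider", "health system", "clinic", "medical"].filter (fun kw => PySem.Str.isIn kw low)).map (fun _ => 1) with hs1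
  set s2 := (["pharmacy", "pbm", "drug"].filter (fun kw => PySem.Str.isIn kw low)).map (fun _ => 2) with hs2
  set s3 := (["pharma", "biotech", "pharmaceutical"].filter (fun kw => PySem.Str.isIn kw low)).map (fun _ => 3) with hs3
  have hmem1 : ∀ x ∈ s1, x = 1 := by intro x hx; rw [hs1] at hx; simp at hx; omega
  have hmem2 : ∀ x ∈ s2, x = 2 := by intro x hx; rw [hs2] at hx; simp at hx; omega
  have hmem3 : ∀ x ∈ s3, x = 3 := by intro x hx; rw [hs3] at hx; simp at hx; omega
  by_cases h0 : ["insurance", "payer", "health plan"].any (fun kw => PySem.Str.isIn kw low)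
  · -- group 0 matches: 0 is a member and the absolute minimum
    obtain ⟨x, hx, hpx⟩ := List.any_eq_true.mp h0
    have hin : (0 : Nat) ∈ s0 := hs0 ▸ List.mem_map.mpr ⟨x, List.mem_filter.mpr ⟨hx, hpx⟩, rfl⟩
    rw [if_pos h0,
        pv_minD_eq (l := s0 ++ s1 ++ s2 ++ s3) (by simp [hin]) (fun _ _ => Nat.zero_le _)]
    rfl
  · have hs0e : s0 = [] := by
      rw [hs0, List.map_eq_nil_iff, List.filter_eq_nil_iff]
      exact List.any_eq_false.mp (Bool.eq_false_iff.mpr h0)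
    rw [if_neg h0, hs0e]
    by_cases h1 : ["hospital", "provider", "health system", "clinic", "medical"].any (fun kw => PySem.Str.isIn kw low)
    · obtain ⟨x, hx, hpx⟩ := List.any_eq_true.mp h1
      have hin : (1 : Nat) ∈ s1 := hs1 ▸ List.mem_map.mpr ⟨x, List.mem_filter.mpr ⟨hx, hpx⟩, rfl⟩
      have hlb : ∀ x ∈ ([] : List Nat) ++ s1 ++ s2 ++ s3, 1 ≤ x := by
        intro x hx
        simp only [List.nil_append, List.mem_append] at hx
        rcases hx with (hx | hx) | hx
        · have := hmem1 x hx; omega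
        · have := hmem2 x hx; omega
        · have := hmem3 x hx; omega
      rw [if_pos h1, pv_minD_eq (l := [] ++ s1 ++ s2 ++ s3) (by simp [hin]) hlb]
      rfl
    · have hs1e : s1 = [] := by
        rw [hs1, List.map_eq_nil_iff, List.filter_eq_nil_iff]
        exact List.any_eq_false.mp (Bool.eq_false_iff.mpr h1)
      rw [if_neg h1, hs1e]
      by_cases h2 : ["pharmacy", "pbm", "drug"].any (fun kw => PySem.Str.isIn kw low)
      · obtain ⟨x, hx, hpx⟩ := List.any_eq_true.mp h2
        have hin : (2 : Nat) ∈ s2 := hs2 ▸ List.mem_map.mpr ⟨x, List.mem_filter.mpr ⟨hx, hpx⟩, rfl⟩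
        have hlb : ∀ x ∈ ([] : List Nat) ++ [] ++ s2 ++ s3, 2 ≤ x := by
          intro x hx
          simp only [List.nil_append, List.mem_append] at hx
          rcases hx with hx | hx
          · have := hmem2 x hx; omega
          · have := hmem3 x hx; omega
        rw [if_pos h2, pv_minD_eq (l := [] ++ [] ++ s2 ++ s3) (by simp [hin]) hlb]
        rfl
      · have hs2e : s2 = [] := by
          rw [hs2, List.map_eq_nil_iff, List.filter_eq_nil_iff]
          exact List.any_eq_false.mp (Bool.eq_false_iff.mpr h2)
        rw [if_neg h2, hs2e]
        by_cases h3 : ["pharma", "biotech", "pharmaceutical"].any (fun kw => PySem.Str.isIn kw low)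
        · obtain ⟨x, hx, hpx⟩ := List.any_eq_true.mp h3
          have hin : (3 : Nat) ∈ s3 := hs3 ▸ List.mem_map.mpr ⟨x, List.mem_filter.mpr ⟨hx, hpx⟩, rfl⟩
          have hlb : ∀ x ∈ ([] : List Nat) ++ [] ++ [] ++ s3, 3 ≤ x := by
            intro x hx
            simp only [List.nil_append] at hx
            have := hmem3 x hx; omega
          rw [if_pos h3, pv_minD_eq (l := [] ++ [] ++ [] ++ s3) (by simp [hin]) hlb]
          rfl
        · have hs3e : s3 = [] := by
            rw [hs3, List.map_eq_nil_iff, List.filter_eq_nil_iff]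
            exact List.any_eq_false.mp (Bool.eq_false_iff.mpr h3)
          rw [if_neg h3, hs3e]
          rfl

-- ===== VERDICT =====
theorem get_target_titles_spec : Claim_equal_get_target_titles := by
  intro industry _
  exact get_target_titles_eq industry
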